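-- pv_equiv track=rewrite | github.com/jiewan02/Algorithm | 프로그래머스/0/181922. 수열과 구간 쿼리 4/수열과 구간 쿼리 4.py | solution
-- ===== SOURCE A (Python) =====
-- def solution(arr, queries):
--     answer = []
--     for query in queries:
--         for i in range(len(arr)):
--             if i >= query[0] and i <= query[1]:
--                 if i % query[2] == 0:
--                     arr[i] += 1
--     return arr
-- ===== SOURCE B (Python) =====
-- def solution(arr, queries):
--     n = len(arr)
--     for q in queries:
--         s, e, k = q[0], q[1], abs(q[2])
--         lo = max(s, 0)
--         hi = min(e, n - 1)
--         start = lo + (-lo) % k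
--         for i in range(start, hi + 1, k):
--             arr[i] += 1
--     return arr
-- ===== Notes on version B (the rewrite author's own statement) =====
-- stated objective: faster
-- what changed: Instead of scanning every index of arr for each query and testing the range/divisibility condition, B computes the first multiple of |k| in the clamped range [max(s,0), min(e,n-1)] and iterates only the multiples with range(start, hi+1, k).
-- outside the precondition, e.g. on solution([], [[0, 1]]): A returns [], B raises IndexError; on solution([1], [[5, 9, 0]]): A returns [1], B raises ZeroDivisionError
import Mathlib
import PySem

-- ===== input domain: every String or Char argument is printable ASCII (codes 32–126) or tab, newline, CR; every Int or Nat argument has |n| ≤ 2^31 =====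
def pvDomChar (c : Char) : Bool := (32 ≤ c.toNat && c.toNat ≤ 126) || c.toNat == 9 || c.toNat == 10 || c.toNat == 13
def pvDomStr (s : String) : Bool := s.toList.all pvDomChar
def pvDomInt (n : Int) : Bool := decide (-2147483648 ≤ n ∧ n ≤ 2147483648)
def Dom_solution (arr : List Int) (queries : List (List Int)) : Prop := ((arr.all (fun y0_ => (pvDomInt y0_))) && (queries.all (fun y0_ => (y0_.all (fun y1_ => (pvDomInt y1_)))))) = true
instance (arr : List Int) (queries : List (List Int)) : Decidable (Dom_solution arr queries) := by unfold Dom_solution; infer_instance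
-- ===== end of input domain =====

-- B replaces A's per-query scan of every index of arr by a direct walk over the multiples of
-- |k| inside the clamped query range (faster: asymptotic, O(Q*N) -> O(Q*range/k)).
-- Both A and B mutate arr in place in Python and return it; the equivalence proved here is
-- about the return value.


-- ===== PORT A =====
def solution (arr : List Int) (queries : List (List Int)) : List Int :=
  queries.foldl (fun a q =>
    (List.range a.length).foldl (fun a (i : Nat) =>
      if (i : Int) ≥ q.getD 0 0 ∧ (i : Int) ≤ q.getD 1 0 then
        if PySem.Int.mod (i : Int) (q.getD 2 0) = 0 then
          a.set i (a.getD i 0 + 1)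
        else a
      else a) a) arr

-- ===== PORT B =====
def solution_alt (arr : List Int) (queries : List (List Int)) : List Int :=
  let n : Int := arr.length
  queries.foldl (fun a q =>
    let s := q.getD 0 0
    let e := q.getD 1 0
    let k : Int := (q.getD 2 0).natAbs
    let lo := max s 0
    let hi := min e (n - 1)
    let start := lo + PySem.Int.mod (-lo) k
    (PySem.List.pyRange start (hi + 1) k).foldl
      (fun a i => a.set i.toNat (a.getD i.toNat 0 + 1)) a) arr

-- ===== PRECONDITION & SPEC =====
-- Pre_ excludes inputs on which any query is shorter than 3 or has third entry 0: on those B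
-- raises (IndexError / ZeroDivisionError), and A either raises too or returns only because its
-- index scan never reaches the faulty access.
def Pre_solution (arr : List Int) (queries : List (List Int)) : Prop :=
  ∀ q ∈ queries, 3 ≤ q.length ∧ q.getD 2 0 ≠ 0
instance (arr : List Int) (queries : List (List Int)) : Decidable (Pre_solution arr queries) := by
  unfold Pre_solution; infer_instance

def pvWitness_solution : List Int × List (List Int) := ([1, 2, 3, 4], [[0, 3, 2], [-1, 10, -3]])

def Spec_solution (arr : List Int) (queries : List (List Int)) (out : List Int) : Prop := out = solution_alt arr queries
instance (arr : List Int) (queries : List (List Int)) (out : List Int) : Decidable (Spec_solution arr queries out) := by unfold Spec_solution; infer_instance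

-- ===== CLAIM (what is proved, stated in full; the proofs are below) =====
def Claim_equal_solution : Prop := ∀ (arr : List Int) (queries : List (List Int)), Dom_solution arr queries → Pre_solution arr queries → Spec_solution arr queries (solution arr queries)

-- ===== LEMMAS AND PROOFS =====

-- canonical "conditionally bump index i" step
def bumpIf (c : Nat → Bool) (a : List Int) (i : Nat) : List Int :=
  if c i then a.set i (a.getD i 0 + 1) else a

theorem length_bumpIf (c : Nat → Bool) (a : List Int) (i : Nat) :
    (bumpIf c a i).length = a.length := by
  unfold bumpIf; split <;> simp

theorem length_foldl_bumpIf (c : Nat → Bool) (l : List Nat) (a : List Int) :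
    (l.foldl (bumpIf c) a).length = a.length := by
  induction l generalizing a with
  | nil => rfl
  | cons i l ih => simpa [List.foldl, length_bumpIf] using ih (bumpIf c a i)

theorem getD_foldl_bumpIf (c : Nat → Bool) (l : List Nat) (hnd : l.Nodup) (a : List Int)
    (j : Nat) (hj : j < a.length) :
    (l.foldl (bumpIf c) a).getD j 0 =
      a.getD j 0 + (if j ∈ l ∧ c j = true then 1 else 0) := by
  induction l generalizing a with
  | nil => simp
  | cons i l ih =>
    rcases List.nodup_cons.mp hnd with ⟨hni, hnd'⟩
    have hj' : j < (bumpIf c a i).length := by rwa [length_bumpIf]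
    have hstep : (bumpIf c a i).getD j 0 =
        a.getD j 0 + (if j = i ∧ c i = true then 1 else 0) := by
      unfold bumpIf
      by_cases hc : c i = true
      · simp only [hc, if_true]
        by_cases hji : j = i
        · subst hji
          simp [List.getElem_set_self, hj]
        · simp [List.getD, List.getElem?_set_ne (by omega : i ≠ j), hji]
      · simp [hc]
    rw [List.foldl_cons, ih hnd' _ hj', hstep]
    by_cases hji : j = i
    · subst hji
      have : j ∉ l := hni
      simp [this]
    · simp [hji, List.mem_cons]

-- A's inner loop is a bumpIf-fold over List.range
theorem innerA_eq (q : List Int) (a : List Int) :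
    (List.range a.length).foldl (fun a (i : Nat) =>
      if (i : Int) ≥ q.getD 0 0 ∧ (i : Int) ≤ q.getD 1 0 then
        if PySem.Int.mod (i : Int) (q.getD 2 0) = 0 then
          a.set i (a.getD i 0 + 1)
        else a
      else a) a
    = (List.range a.length).foldl
        (bumpIf (fun i => decide ((i : Int) ≥ q.getD 0 0 ∧ (i : Int) ≤ q.getD 1 0 ∧
                                  PySem.Int.mod (i : Int) (q.getD 2 0) = 0))) a := by
  apply PySem.List.foldl_congr_mem
  intro acc x _
  unfold bumpIf
  simp only [decide_eq_true_eq]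
  split_ifs <;> first | rfl | (exfalso; tauto)

-- B's inner loop is a bumpIf-fold (always-true condition) over the mapped range
theorem innerB_eq (start hi k : Int) (a : List Int) :
    (PySem.List.pyRange start (hi + 1) k).foldl
      (fun a i => a.set i.toNat (a.getD i.toNat 0 + 1)) a
    = ((PySem.List.pyRange start (hi + 1) k).map Int.toNat).foldl
        (bumpIf (fun _ => true)) a := by
  rw [List.foldl_map]
  rfl

-- the per-query steps agree
theorem step_eq (q : List Int) (a : List Int) (n : Int) (hn : (a.length : Int) = n)
    (hk : q.getD 2 0 ≠ 0) :
    (List.range a.length).foldl (fun a (i : Nat) =>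
      if (i : Int) ≥ q.getD 0 0 ∧ (i : Int) ≤ q.getD 1 0 then
        if PySem.Int.mod (i : Int) (q.getD 2 0) = 0 then
          a.set i (a.getD i 0 + 1)
        else a
      else a) a
    = (PySem.List.pyRange (max (q.getD 0 0) 0 + PySem.Int.mod (-(max (q.getD 0 0) 0)) ((q.getD 2 0).natAbs : Int))
        (min (q.getD 1 0) (n - 1) + 1) ((q.getD 2 0).natAbs : Int)).foldl
        (fun a i => a.set i.toNat (a.getD i.toNat 0 + 1)) a := by
  subst hn
  rw [innerA_eq, innerB_eq]
  set s := q.getD 0 0 with hs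
  set e := q.getD 1 0 with he
  set k0 := q.getD 2 0 with hk0def
  set k : Int := ((q.getD 2 0).natAbs : Int) with hkdef
  have kpos : (0 : Int) < k := by
    rw [hkdef]; exact_mod_cast Int.natAbs_pos.mpr hk
  set lo := max s 0 with hlodef
  set hi := min e ((a.length : Int) - 1) with hhidef
  have hlo : (0 : Int) ≤ lo := le_max_right s 0
  have hm0 : PySem.Int.mod (-lo) k = (-lo) % k := PySem.Int.mod_eq_emod_of_pos kpos
  have hm1 : 0 ≤ PySem.Int.mod (-lo) k := by rw [hm0]; exact Int.emod_nonneg _ kpos.ne'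
  have hm2 : PySem.Int.mod (-lo) k < k := by rw [hm0]; exact Int.emod_lt_of_pos _ kpos
  set m := PySem.Int.mod (-lo) k with hmdef
  set start := lo + m with hstartdef
  have hstart0 : (0 : Int) ≤ start := by omega
  have hstartdvd : k ∣ start := by
    refine ⟨-((-lo) / k), ?_⟩
    rw [hstartdef, hm0, Int.emod_def]
    ring
  set lB := (PySem.List.pyRange start (hi + 1) k).map Int.toNat with hlBdef
  have hmemB : ∀ j : Nat, j ∈ lB ↔
      (start ≤ (j : Int) ∧ (j : Int) < hi + 1 ∧ k ∣ (j : Int) - start) := by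
    intro j
    rw [hlBdef]
    simp only [List.mem_map]
    constructor
    · rintro ⟨x, hx, rfl⟩
      rw [PySem.List.mem_pyRange_iff_of_pos kpos] at hx
      have hx0 : 0 ≤ x := le_trans hstart0 hx.1
      rw [Int.toNat_of_nonneg hx0]
      exact hx
    · intro hjm
      exact ⟨(j : Int), (PySem.List.mem_pyRange_iff_of_pos kpos _).mpr hjm, Int.toNat_natCast j⟩
  have hnodB : lB.Nodup := by
    rw [hlBdef, PySem.List.pyRange_of_pos start (hi + 1) kpos, List.map_map]
    refine List.Nodup.map ?_ List.nodup_range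
    intro t1 t2 h
    simp only [Function.comp_apply] at h
    have h1 : (0 : Int) ≤ start + k * (t1 : Int) :=
      add_nonneg hstart0 (mul_nonneg kpos.le (by positivity))
    have h2 : (0 : Int) ≤ start + k * (t2 : Int) :=
      add_nonneg hstart0 (mul_nonneg kpos.le (by positivity))
    have h3 : start + k * (t1 : Int) = start + k * (t2 : Int) := by
      rw [← Int.toNat_of_nonneg h1, ← Int.toNat_of_nonneg h2, h]
    have h4 : k * (t1 : Int) = k * (t2 : Int) := by omega
    exact_mod_cast mul_left_cancel₀ kpos.ne' h4
  set cA := fun i : Nat =>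
    decide ((i : Int) ≥ s ∧ (i : Int) ≤ e ∧ PySem.Int.mod (i : Int) k0 = 0) with hcAdef
  apply List.ext_getElem
  · rw [length_foldl_bumpIf, length_foldl_bumpIf]
  intro j hja hjb
  have hj : j < a.length := by rwa [length_foldl_bumpIf] at hja
  have gA := getD_foldl_bumpIf cA (List.range a.length) List.nodup_range a j hj
  have gB := getD_foldl_bumpIf (fun _ => true) lB hnodB a j hj
  rw [List.getD_eq_getElem _ _ hja] at gA
  rw [List.getD_eq_getElem _ _ hjb] at gB
  rw [gA, gB]
  have hdvd_core : k ∣ (j : Int) - start ↔ k ∣ (j : Int) := by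
    constructor
    · intro h
      have := dvd_add hstartdvd h
      simpa using this
    · intro h
      exact dvd_sub h hstartdvd
  have hdvd_iff : PySem.Int.mod (j : Int) k0 = 0 ↔ k ∣ (j : Int) - start := by
    rw [PySem.Int.mod_eq_zero_iff_dvd, hdvd_core, hkdef, ← hk0def, Int.natAbs_dvd]
  have hiff : (j ∈ List.range a.length ∧ cA j = true) ↔ (j ∈ lB ∧ true = true) := by
    rw [hmemB, hcAdef]
    simp only [List.mem_range, decide_eq_true_eq, and_true, ge_iff_le]
    constructor
    · rintro ⟨hjn, hsle, hje, hmod⟩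
      obtain ⟨t, ht⟩ := hdvd_iff.mp hmod
      have hloj : lo ≤ (j : Int) := by omega
      have hgap : -k < (j : Int) - start := by omega
      have ht0 : 0 ≤ t := by
        by_contra hneg
        have : t ≤ -1 := by omega
        nlinarith
      have : 0 ≤ (j : Int) - start := by
        rw [ht]; exact mul_nonneg kpos.le ht0
      refine ⟨by omega, by omega, hdvd_iff.mp hmod⟩
    · rintro ⟨hsj, hlt, hd⟩
      have hlos : lo ≤ start := by omega
      refine ⟨hj, by omega, by omega, hdvd_iff.mpr hd⟩
  rw [if_congr hiff rfl rfl]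

theorem step_len (q : List Int) (a : List Int) :
    ((List.range a.length).foldl (fun a (i : Nat) =>
      if (i : Int) ≥ q.getD 0 0 ∧ (i : Int) ≤ q.getD 1 0 then
        if PySem.Int.mod (i : Int) (q.getD 2 0) = 0 then
          a.set i (a.getD i 0 + 1)
        else a
      else a) a).length = a.length := by
  rw [innerA_eq, length_foldl_bumpIf]

theorem outer_eq (qs : List (List Int)) (a : List Int) (n : Int)
    (hn : (a.length : Int) = n)
    (hqs : ∀ q ∈ qs, 3 ≤ q.length ∧ q.getD 2 0 ≠ 0) :
    qs.foldl (fun a q =>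
      (List.range a.length).foldl (fun a (i : Nat) =>
        if (i : Int) ≥ q.getD 0 0 ∧ (i : Int) ≤ q.getD 1 0 then
          if PySem.Int.mod (i : Int) (q.getD 2 0) = 0 then
            a.set i (a.getD i 0 + 1)
          else a
        else a) a) a
    = qs.foldl (fun a q =>
        (PySem.List.pyRange (max (q.getD 0 0) 0 + PySem.Int.mod (-(max (q.getD 0 0) 0)) ((q.getD 2 0).natAbs : Int))
          (min (q.getD 1 0) (n - 1) + 1) ((q.getD 2 0).natAbs : Int)).foldl
          (fun a i => a.set i.toNat (a.getD i.toNat 0 + 1)) a) a := by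
  induction qs generalizing a with
  | nil => rfl
  | cons q qs ih =>
    have hq := hqs q (List.mem_cons_self ..)
    rw [List.foldl_cons, List.foldl_cons,
        step_eq q a n hn hq.2,
        ih _ (by rw [← step_eq q a n hn hq.2, step_len]; exact hn)
          (fun q hq => hqs q (List.mem_cons_of_mem _ hq))]

-- ===== VERDICT (by name: the statement is the Claim_ definition above) =====
theorem solution_spec : Claim_equal_solution := by
  intro arr queries _ hpre
  unfold Spec_solution solution solution_alt
  exact outer_eq queries arr arr.length rfl hpre
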